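-- pv_equiv track=rewrite | github.com/ack1d/asgion | src/asgion/cli/_runner.py | _parse_path
-- ===== SOURCE A (Python) =====
-- _WS_PREFIXES = ("ws:", "wss:")
--
-- _HTTP_PREFIXES = ("http:", "https:")
--
-- def _parse_path(p: str) -> tuple[str, str]:
--     """Return (scope_type, path) for a path string with optional protocol prefix."""
--     for prefix in _WS_PREFIXES:
--         if p.startswith(prefix):
--             return "websocket", p[len(prefix) :]
--     for prefix in _HTTP_PREFIXES:
--         if p.startswith(prefix):
--             return "http", p[len(prefix) :]
--     return "http", p
-- ===== SOURCE B (Python) =====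
-- _SCHEME_MAP = {"ws": "websocket", "wss": "websocket", "http": "http", "https": "http"}
--
--
-- def _parse_path(p: str) -> tuple[str, str]:
--     """Return (scope_type, path): parse up to the first colon, dispatch via a table."""
--     i = p.find(":")
--     if i != -1:
--         scope = _SCHEME_MAP.get(p[:i])
--         if scope is not None:
--             return scope, p[i + 1:]
--     return "http", p
-- ===== Notes on version B (the rewrite author's own statement) =====
-- stated objective: simpler
-- what changed: Instead of scanning two prefix tuples with startswith and slicing by prefix length, B locates the first colon once, looks the scheme before it up in a table, and slices after the colon; the fallback covers no-colon and unknown schemes.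
import Mathlib
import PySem

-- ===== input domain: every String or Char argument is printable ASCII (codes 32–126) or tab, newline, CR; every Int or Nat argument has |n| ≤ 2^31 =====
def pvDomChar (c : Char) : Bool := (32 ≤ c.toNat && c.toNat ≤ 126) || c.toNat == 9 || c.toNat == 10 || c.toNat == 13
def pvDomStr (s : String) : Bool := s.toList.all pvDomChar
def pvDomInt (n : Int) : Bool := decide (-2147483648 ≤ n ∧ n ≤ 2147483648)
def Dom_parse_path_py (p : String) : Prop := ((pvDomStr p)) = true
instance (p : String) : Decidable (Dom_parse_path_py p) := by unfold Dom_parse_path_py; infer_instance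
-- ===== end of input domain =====

-- B replaces A's two prefix-scanning loops by one find of the first colon plus a scheme table; objective: simpler.

-- ===== PORT A =====
def pvWsPrefixes : List String := ["ws:", "wss:"]
def pvHttpPrefixes : List String := ["http:", "https:"]

-- 'for prefix in prefixes: if p.startswith(prefix): return scope, p[len(prefix):]'
def pvPrefixLoop (p : String) (scope : String) : List String → Option (String × String)
  | [] => none
  | pre :: rest =>
    if PySem.Str.startswith p pre then
      some (scope, PySem.Str.slice p (some (PySem.Str.len pre)) none)
    else pvPrefixLoop p scope rest

def parse_path_py (p : String) : String × String :=
  match pvPrefixLoop p "websocket" pvWsPrefixes with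
  | some r => r
  | none =>
    match pvPrefixLoop p "http" pvHttpPrefixes with
    | some r => r
    | none => ("http", p)

-- ===== PORT B =====
def pvSchemeMap : PySem.Dict String String :=
  ⟨[("ws", "websocket"), ("wss", "websocket"), ("http", "http"), ("https", "http")]⟩

def parse_path_py_alt (p : String) : String × String :=
  let i := PySem.Str.find p ":"
  if i ≠ -1 then
    match PySem.Dict.get? pvSchemeMap (PySem.Str.slice p none (some i)) with
    | some scope => (scope, PySem.Str.slice p (some (i + 1)) none)
    | none => ("http", p)
  else ("http", p)

-- ===== PRECONDITION & SPEC =====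
def Spec_parse_path_py (p : String) (out : String × String) : Prop := out = parse_path_py_alt p
instance (p : String) (out : String × String) : Decidable (Spec_parse_path_py p out) := by unfold Spec_parse_path_py; infer_instance

-- ===== CLAIM (what is proved, stated in full; the proofs are below) =====
def Claim_equal_parse_path_py : Prop := ∀ (p : String), Dom_parse_path_py p → Spec_parse_path_py p (parse_path_py p)

-- ===== LEMMAS AND PROOFS =====

-- the text before the first colon, followed by that colon, is a prefix of the whole string
theorem pv_key_prefix (l k : List Char) (n : Nat) (h1 : l.take n = k) (h2 : [':'] <+: l.drop n) :
    (k ++ [':']) <+: l := by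
  obtain ⟨t, ht⟩ := h2
  refine ⟨t, ?_⟩
  have h := (List.take_append_drop n l)
  rw [h1, ← ht] at h
  simpa using h

-- if p does not start with '<k>:' then the slice of p up to the first colon is not k
theorem pv_not_key (p : String) (kS : String)
    (h1 : PySem.Chars.startswith p.toList (kS.toList ++ [':']) = false)
    (hi : 0 ≤ PySem.Chars.find p.toList [':']) :
    PySem.Str.slice p none (some (PySem.Chars.find p.toList [':'])) ≠ kS := by
  intro h
  have hdrop := (PySem.Chars.find_spec (s := p.toList) (sub := [':']) hi).1
  have hk := congrArg String.toList h
  rw [PySem.Str.toList_slice, PySem.Chars.slice_eq_listSlice, PySem.List.slice_to _ hi] at hk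
  have hpre := pv_key_prefix _ _ _ hk hdrop
  have := (PySem.Chars.startswith_iff p.toList (kS.toList ++ [':'])).mpr hpre
  rw [h1] at this
  exact absurd this (by simp)

-- ===== VERDICT (by name: the statement is the Claim_ definition above) =====
theorem parse_path_py_spec : Claim_equal_parse_path_py := by
  intro p _
  unfold Spec_parse_path_py
  by_cases h1 : PySem.Chars.startswith p.toList ['w','s',':'] = true
  · obtain ⟨t, ht⟩ := (PySem.Chars.startswith_iff _ _).mp h1
    have hl : p.toList = 'w'::'s'::':'::t := by simpa using ht.symm
    have hf : PySem.Chars.find p.toList [':'] = 2 := by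
      simp [hl, PySem.Chars.find, PySem.Chars.find.go, List.isPrefixOf]
    have hsch : PySem.Str.slice p none (some 2) = "ws" := by
      apply String.toList_inj.mp
      simp [hl, PySem.List.slice]
    simp [parse_path_py, parse_path_py_alt, pvPrefixLoop, pvWsPrefixes, h1, hf, hsch,
      PySem.Dict.get?, pvSchemeMap]
  · rw [Bool.not_eq_true] at h1
    by_cases h2 : PySem.Chars.startswith p.toList ['w','s','s',':'] = true
    · obtain ⟨t, ht⟩ := (PySem.Chars.startswith_iff _ _).mp h2
      have hl : p.toList = 'w'::'s'::'s'::':'::t := by simpa using ht.symm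
      have hf : PySem.Chars.find p.toList [':'] = 3 := by
        simp [hl, PySem.Chars.find, PySem.Chars.find.go, List.isPrefixOf]
      have hsch : PySem.Str.slice p none (some 3) = "wss" := by
        apply String.toList_inj.mp
        simp [hl, PySem.List.slice]
      simp [parse_path_py, parse_path_py_alt, pvPrefixLoop, pvWsPrefixes, h1, h2, hf, hsch,
        PySem.Dict.get?, pvSchemeMap]
    · rw [Bool.not_eq_true] at h2
      by_cases h3 : PySem.Chars.startswith p.toList ['h','t','t','p',':'] = true
      · obtain ⟨t, ht⟩ := (PySem.Chars.startswith_iff _ _).mp h3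
        have hl : p.toList = 'h'::'t'::'t'::'p'::':'::t := by simpa using ht.symm
        have hf : PySem.Chars.find p.toList [':'] = 4 := by
          simp [hl, PySem.Chars.find, PySem.Chars.find.go, List.isPrefixOf]
        have hsch : PySem.Str.slice p none (some 4) = "http" := by
          apply String.toList_inj.mp
          simp [hl, PySem.List.slice]
        simp [parse_path_py, parse_path_py_alt, pvPrefixLoop, pvWsPrefixes, pvHttpPrefixes,
          h1, h2, h3, hf, hsch, PySem.Dict.get?, pvSchemeMap]
      · rw [Bool.not_eq_true] at h3
        by_cases h4 : PySem.Chars.startswith p.toList ['h','t','t','p','s',':'] = true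
        · obtain ⟨t, ht⟩ := (PySem.Chars.startswith_iff _ _).mp h4
          have hl : p.toList = 'h'::'t'::'t'::'p'::'s'::':'::t := by simpa using ht.symm
          have hf : PySem.Chars.find p.toList [':'] = 5 := by
            simp [hl, PySem.Chars.find, PySem.Chars.find.go, List.isPrefixOf]
          have hsch : PySem.Str.slice p none (some 5) = "https" := by
            apply String.toList_inj.mp
            simp [hl, PySem.List.slice]
          simp [parse_path_py, parse_path_py_alt, pvPrefixLoop, pvWsPrefixes, pvHttpPrefixes,
            h1, h2, h3, h4, hf, hsch, PySem.Dict.get?, pvSchemeMap]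
        · rw [Bool.not_eq_true] at h4
          have hA : parse_path_py p = ("http", p) := by
            simp [parse_path_py, pvPrefixLoop, pvWsPrefixes, pvHttpPrefixes, h1, h2, h3, h4]
          by_cases hcol : PySem.Chars.find p.toList [':'] = -1
          · simp [parse_path_py_alt, hA, hcol]
          · have hge : 0 ≤ PySem.Chars.find p.toList [':'] := by
              have := PySem.Chars.neg_one_le_find p.toList [':']
              omega
            have n1 := pv_not_key p "ws" (by simpa using h1) hge
            have n2 := pv_not_key p "wss" (by simpa using h2) hge
            have n3 := pv_not_key p "http" (by simpa using h3) hge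
            have n4 := pv_not_key p "https" (by simpa using h4) hge
            have hnone : PySem.Dict.get? pvSchemeMap
                (PySem.Str.slice p none (some (PySem.Chars.find p.toList [':']))) = none := by
              simp [PySem.Dict.get?, pvSchemeMap, Ne.symm n1, Ne.symm n2, Ne.symm n3, Ne.symm n4]
            simp [parse_path_py_alt, hA, hcol, hnone]
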